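-- pv_equiv track=rewrite | github.com/kanejames0430/Chimaera | methods.py | freqsCalculator
-- ===== SOURCE A (Python) =====
-- def freqsCalculator(content, tokenizedDictionary):
--     '''
--     from the tokenized dictionary: for every language,
--         and for every tokenized word,
--             count the amount of times it appears in the document.
--     content pertains to the processed text of the document. tokenizedDictionary is our processed dictionary
--     '''
--     content = content.split(' ')
--     # reorganize tokDict into a dictionary of format {[language, tokenized word] : 0}
--     freqs = {}
--
--     # create a new dictionary with lists as entries in the words list instead of just the words
--     # e.g. [word_1, word_2, ..., word_n] -> [(word_1, 0), (word_2,0), ..., (word_n, 0)]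
--     for x,y in tokenizedDictionary.items():
--         for word in y:
--             freqs[x,word] = 0
--
--     for i,j in freqs.items():
--         for word2 in content:
--             if i[1] in word2:
--                 freqs[i] += 1
--     return freqs
-- ===== SOURCE B (Python) =====
-- def freqsCalculator(content, tokenizedDictionary):
--     words = content.split(' ')
--     # per-pattern substring count, computed once per distinct pattern
--     counts = {}
--     freqs = {}
--     for lang, patterns in tokenizedDictionary.items():
--         for p in patterns:
--             if p not in counts:
--                 counts[p] = sum(1 for w in words if p in w)
--             freqs[(lang, p)] = counts[p]
--     return freqs
-- ===== Notes on version B (the rewrite author's own statement) =====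
-- stated objective: alternative
-- what changed: B replaces A's two passes (build a zero-valued dict of all (language,word) keys, then re-walk that dict incrementing each key once per matching content word) by a single pass over the dictionary that writes each key's final count directly, computing the substring count once per distinct pattern via a memo dict instead of once per (language,word) pair.
import Mathlib
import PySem

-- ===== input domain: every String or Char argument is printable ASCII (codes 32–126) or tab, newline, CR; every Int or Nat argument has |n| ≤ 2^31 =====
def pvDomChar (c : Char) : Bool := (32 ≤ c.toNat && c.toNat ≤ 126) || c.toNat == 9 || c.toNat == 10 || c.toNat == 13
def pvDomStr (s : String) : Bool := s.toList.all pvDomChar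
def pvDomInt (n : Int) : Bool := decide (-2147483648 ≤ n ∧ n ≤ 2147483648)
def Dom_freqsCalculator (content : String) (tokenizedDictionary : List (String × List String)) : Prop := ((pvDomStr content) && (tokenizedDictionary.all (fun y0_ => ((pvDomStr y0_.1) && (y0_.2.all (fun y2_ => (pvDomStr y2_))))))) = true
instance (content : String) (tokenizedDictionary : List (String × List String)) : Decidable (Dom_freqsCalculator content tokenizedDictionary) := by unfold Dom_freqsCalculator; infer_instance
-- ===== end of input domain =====

-- B replaces A's two dict passes by a single pass writing each key's final count directly,
-- memoizing the per-pattern substring count so it is computed once per distinct pattern (objective: alternative).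

-- ===== PORT A =====
-- content.split(' '): the separator is the nonempty literal " ", so split? is always `some`; .getD [] only unwraps
def freqsCalculator (content : String) (tokenizedDictionary : List (String × List String)) : List (String × String × Int) :=
  let contentWords := (PySem.Str.split? content " ").getD []
  -- for x,y in tokenizedDictionary.items(): for word in y: freqs[x,word] = 0
  let freqs0 : PySem.Dict (String × String) Int :=
    tokenizedDictionary.foldl
      (fun d xy => xy.2.foldl (fun d word => d.insert (xy.1, word) 0) d) PySem.Dict.empty
  -- for i,j in freqs.items(): for word2 in content: if i[1] in word2: freqs[i] += 1
  let freqs : PySem.Dict (String × String) Int :=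
    freqs0.items.foldl
      (fun d ij =>
        contentWords.foldl
          (fun d word2 => if PySem.Str.isIn ij.1.2 word2 then d.modify ij.1 0 (· + 1) else d) d)
      freqs0
  freqs.items.map (fun kv => (kv.1.1, kv.1.2, kv.2))

-- ===== PORT B =====
-- sum(1 for w in words if p in w)
def pvSumMatches (words : List String) (p : String) : Int :=
  words.foldl (fun n w => if PySem.Str.isIn p w then n + 1 else n) 0

def freqsCalculator_alt (content : String) (tokenizedDictionary : List (String × List String)) : List (String × String × Int) :=
  let words := (PySem.Str.split? content " ").getD []
  -- state = (counts memo, freqs); for lang, patterns: for p: memoize counts[p]; freqs[(lang,p)] = counts[p]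
  let fin :=
    tokenizedDictionary.foldl
      (fun st lp =>
        lp.2.foldl
          (fun (st : PySem.Dict String Int × PySem.Dict (String × String) Int) p =>
            let counts := if st.1.contains p then st.1 else st.1.insert p (pvSumMatches words p)
            (counts, st.2.insert (lp.1, p) (counts.getD p 0)))
          st)
      (PySem.Dict.empty, PySem.Dict.empty)
  fin.2.items.map (fun kv => (kv.1.1, kv.1.2, kv.2))

-- ===== PRECONDITION & SPEC =====
def Spec_freqsCalculator (content : String) (tokenizedDictionary : List (String × List String)) (out : List (String × String × Int)) : Prop := out = freqsCalculator_alt content tokenizedDictionary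
instance (content : String) (tokenizedDictionary : List (String × List String)) (out : List (String × String × Int)) : Decidable (Spec_freqsCalculator content tokenizedDictionary out) := by unfold Spec_freqsCalculator; infer_instance

-- ===== CLAIM (what is proved, stated in full; the proofs are below) =====
def Claim_equal_freqsCalculator : Prop := ∀ (content : String) (tokenizedDictionary : List (String × List String)), Dom_freqsCalculator content tokenizedDictionary → Spec_freqsCalculator content tokenizedDictionary (freqsCalculator content tokenizedDictionary)

-- ===== LEMMAS AND PROOFS =====

-- a nested loop over (language, word-list) pairs is a flat loop over the flattened (language, word) pairs
theorem pv_foldl_flat {σ : Type} (tok : List (String × List String)) (F : σ → (String × String) → σ) (s0 : σ) :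
    tok.foldl (fun s xy => xy.2.foldl (fun s w => F s (xy.1, w)) s) s0
      = (tok.flatMap (fun xy => xy.2.map (fun w => (xy.1, w)))).foldl F s0 := by
  induction tok generalizing s0 with
  | nil => rfl
  | cons hd tl ih => simp [List.foldl_append, List.foldl_map, ih]

-- the running-sum loop shifts its accumulator
theorem pv_sum_shift (ws : List String) (p : String) (n : Int) :
    ws.foldl (fun n w => if PySem.Str.isIn p w then n + 1 else n) n = n + pvSumMatches ws p := by
  induction ws generalizing n with
  | nil => simp [pvSumMatches]
  | cons w t ih =>
      show List.foldl _ (if PySem.Str.isIn p w then n + 1 else n) t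
          = n + List.foldl _ (if PySem.Str.isIn p w then (0 : Int) + 1 else 0) t
      by_cases h : PySem.Str.isIn p w
      · rw [if_pos h, if_pos h, ih, ih ((0 : Int) + 1)]
        unfold pvSumMatches; ring
      · rw [if_neg h, if_neg h, ih, ih (0 : Int)]
        unfold pvSumMatches; ring

-- inner counting loop of A: keys are preserved and only key k's value grows, by pvSumMatches
theorem pv_inner (ws : List String) (d : PySem.Dict (String × String) Int) (k : String × String)
    (hk : d.contains k = true) :
    (ws.foldl (fun d w => if PySem.Str.isIn k.2 w then d.modify k 0 (· + 1) else d) d).keys = d.keys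
    ∧ ∀ k', (ws.foldl (fun d w => if PySem.Str.isIn k.2 w then d.modify k 0 (· + 1) else d) d).getD k' 0
            = d.getD k' 0 + if k' = k then pvSumMatches ws k.2 else 0 := by
  induction ws generalizing d with
  | nil => simp [pvSumMatches]
  | cons w t ih =>
      simp only [List.foldl_cons]
      by_cases h : PySem.Str.isIn k.2 w
      · have hk' : (d.modify k 0 (· + 1)).contains k = true := by
          simp [PySem.Dict.contains_modify]
        obtain ⟨ihk, ihv⟩ := ih (d.modify k 0 (· + 1)) hk'
        constructor
        · rw [h, if_pos rfl] at *
          rw [ihk, PySem.Dict.keys_modify, PySem.Dict.keys_insert_of_contains d _ hk]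
        · intro k'
          rw [if_pos h, ihv k', PySem.Dict.getD_modify]
          have : pvSumMatches (w :: t) k.2 = 1 + pvSumMatches t k.2 := by
            show List.foldl _ (if PySem.Str.isIn k.2 w then (0 : Int) + 1 else 0) t = _
            rw [if_pos h, pv_sum_shift]
            ring
          rw [this]
          by_cases hkk : k' = k
          · subst hkk
            rw [if_pos rfl, if_pos rfl, if_pos rfl]
            ring
          · rw [if_neg hkk, if_neg hkk, if_neg hkk]
      · obtain ⟨ihk, ihv⟩ := ih d hk
        constructor
        · rw [if_neg h]; exact ihk
        · intro k'
          rw [if_neg h, ihv k']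
          have : pvSumMatches (w :: t) k.2 = pvSumMatches t k.2 := by
            show List.foldl _ (if PySem.Str.isIn k.2 w then (0 : Int) + 1 else 0) t = _
            rw [if_neg h]
            rfl
          rw [this]

-- outer loop of A over a snapshot list l of items: keys preserved; each key counted once per occurrence in l
theorem pv_outer (ws : List String) (l : List ((String × String) × Int))
    (d : PySem.Dict (String × String) Int) (hl : ∀ kv ∈ l, kv.1 ∈ d.keys) :
    (l.foldl (fun d ij => ws.foldl
        (fun d w => if PySem.Str.isIn ij.1.2 w then d.modify ij.1 0 (· + 1) else d) d) d).keys = d.keys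
    ∧ ∀ k', (l.foldl (fun d ij => ws.foldl
        (fun d w => if PySem.Str.isIn ij.1.2 w then d.modify ij.1 0 (· + 1) else d) d) d).getD k' 0
        = d.getD k' 0 + ((l.map Prod.fst).count k' : Int) * pvSumMatches ws k'.2 := by
  induction l generalizing d with
  | nil => simp
  | cons kv t ih =>
      have hmem : kv.1 ∈ d.keys := hl kv (by simp)
      have hc : d.contains kv.1 = true := (PySem.Dict.contains_iff_mem_keys d kv.1).mpr hmem
      obtain ⟨ik, iv⟩ := pv_inner ws d kv.1 hc
      set d1 := ws.foldl (fun d w => if PySem.Str.isIn kv.1.2 w then d.modify kv.1 0 (· + 1) else d) d with hd1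
      obtain ⟨ok, ov⟩ := ih d1 (by intro x hx; rw [ik]; exact hl x (by simp [hx]))
      refine ⟨by simpa [ik] using ok, ?_⟩
      intro k'
      simp only [List.foldl_cons, ← hd1]
      rw [ov k', iv k']
      simp only [List.map_cons, List.count_cons]
      by_cases hkk : k' = kv.1
      · subst hkk; simp; ring
      · simp [hkk, Ne.symm hkk]

-- all values in the zero-building fold stay 0
theorem pv_zero_values (ks : List (String × String)) (d : PySem.Dict (String × String) Int)
    (h : ∀ k', d.getD k' 0 = 0) :
    ∀ k', (ks.foldl (fun d k => d.insert k (0 : Int)) d).getD k' 0 = 0 := by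
  induction ks generalizing d with
  | nil => exact h
  | cons k t ih =>
      intro k'
      exact ih (d.insert k 0) (fun k'' => by rw [PySem.Dict.getD_insert]; split <;> simp [h]) k'

-- values of the direct-count fold: every present key holds its pvSumMatches value
theorem pv_direct_values (ws : List String) (ks : List (String × String))
    (d : PySem.Dict (String × String) Int)
    (h : ∀ k' ∈ d.keys, d.getD k' 0 = pvSumMatches ws k'.2) :
    ∀ k' ∈ (ks.foldl (fun d k => d.insert k (pvSumMatches ws k.2)) d).keys,
      (ks.foldl (fun d k => d.insert k (pvSumMatches ws k.2)) d).getD k' 0 = pvSumMatches ws k'.2 := by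
  induction ks generalizing d with
  | nil => exact h
  | cons k t ih =>
      refine ih (d.insert k (pvSumMatches ws k.2)) ?_
      intro k' hk'
      rw [PySem.Dict.getD_insert]
      rcases (PySem.Dict.mem_keys_insert d k k' _).mp hk' with h1 | h1
      · simp [h1]
      · split
        · next he => subst he; rfl
        · exact h k' h1
  
-- B's memo is correct, so B's freqs dict is the direct-count fold
theorem pv_memo (ws : List String) (ks : List (String × String))
    (st : PySem.Dict String Int × PySem.Dict (String × String) Int)
    (h : ∀ p, st.1.contains p = true → st.1.getD p 0 = pvSumMatches ws p) :
    (ks.foldl (fun st k =>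
        let counts := if st.1.contains k.2 then st.1 else st.1.insert k.2 (pvSumMatches ws k.2)
        (counts, st.2.insert k (counts.getD k.2 0))) st).2
      = ks.foldl (fun d k => d.insert k (pvSumMatches ws k.2)) st.2 := by
  induction ks generalizing st with
  | nil => rfl
  | cons k t ih =>
      simp only [List.foldl_cons]
      by_cases hc : st.1.contains k.2
      · rw [if_pos hc] at *
        have hv : st.1.getD k.2 0 = pvSumMatches ws k.2 := h k.2 hc
        rw [hv] at *
        exact ih (st.1, st.2.insert k (pvSumMatches ws k.2)) h
      · rw [if_neg hc] at *
        have hv : (st.1.insert k.2 (pvSumMatches ws k.2)).getD k.2 0 = pvSumMatches ws k.2 := by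
          rw [PySem.Dict.getD_insert]; simp
        rw [hv]
        refine ih (st.1.insert k.2 (pvSumMatches ws k.2), st.2.insert k (pvSumMatches ws k.2)) ?_
        intro p hp
        rw [PySem.Dict.getD_insert]
        by_cases hpk : p = k.2
        · simp [hpk]
        · rw [if_neg hpk]
          rw [PySem.Dict.contains_insert] at hp
          simp [hpk] at hp
          exact h p hp

-- a dict with Nodup keys is determined by its keys list and its getD values
theorem pv_items_char {ν : Type} (d : PySem.Dict (String × String) ν) (d0 : ν) (hn : d.keys.Nodup) :
    d.items = d.keys.map (fun k => (k, d.getD k d0)) := by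
  have : d.keys.map (fun k => (k, d.getD k d0)) = d.items.map (fun kv => (kv.1, d.getD kv.1 d0)) := by
    show (d.items.map Prod.fst).map _ = _
    rw [List.map_map]; rfl
  rw [this]
  have : ∀ kv ∈ d.items, (kv.1, d.getD kv.1 d0) = kv := by
    intro kv hkv
    have := PySem.Dict.get?_of_mem_items d (k := kv.1) (v := kv.2) (by simpa using hkv) hn
    rw [PySem.Dict.getD_eq_get?_getD, this]
    simp
  have h2 : d.items.map (fun kv => (kv.1, d.getD kv.1 d0)) = d.items.map (fun a => a) :=
    List.map_congr_left this
  rw [h2]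
  simp

-- ===== VERDICT (by name: the statement is the Claim_ definition above) =====
theorem freqsCalculator_spec : Claim_equal_freqsCalculator := by
  intro content tok _
  show freqsCalculator content tok = freqsCalculator_alt content tok
  unfold freqsCalculator freqsCalculator_alt
  simp only []
  set ws := (PySem.Str.split? content " ").getD [] with hws
  set ks := tok.flatMap (fun xy => xy.2.map (fun w => (xy.1, w))) with hks
  -- flatten both nested folds
  rw [pv_foldl_flat tok (fun (d : PySem.Dict (String × String) Int) k => d.insert k 0) PySem.Dict.empty]
  rw [pv_foldl_flat tok (fun (st : PySem.Dict String Int × PySem.Dict (String × String) Int) k =>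
        let counts := if st.1.contains k.2 then st.1 else st.1.insert k.2 (pvSumMatches ws k.2)
        (counts, st.2.insert k (counts.getD k.2 0))) (PySem.Dict.empty, PySem.Dict.empty)]
  rw [pv_memo ws ks (PySem.Dict.empty, PySem.Dict.empty) (by intro p hp; simp [PySem.Dict.contains_empty] at hp)]
  -- characterize the three dicts
  set dZ := ks.foldl (fun d k => d.insert k (0 : Int)) PySem.Dict.empty with hdZ
  set dC := ks.foldl (fun d k => d.insert k (pvSumMatches ws k.2)) PySem.Dict.empty with hdC
  have hkZ : dZ.keys = PySem.Set.ofList ks := by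
    rw [hdZ, PySem.Dict.keys_foldl_insert ks (fun _ _ => (0 : Int)) PySem.Dict.empty,
        PySem.Dict.keys_empty]
    exact PySem.Set.update_empty ks
  have hkC : dC.keys = PySem.Set.ofList ks := by
    rw [hdC, PySem.Dict.keys_foldl_insert ks (fun _ k => pvSumMatches ws k.2) PySem.Dict.empty,
        PySem.Dict.keys_empty]
    exact PySem.Set.update_empty ks
  have hnodup : dZ.keys.Nodup := by rw [hkZ]; exact PySem.Set.nodup_ofList ks
  have hnodupC : dC.keys.Nodup := by rw [hkC]; exact PySem.Set.nodup_ofList ks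
  have hZ0 : ∀ k', dZ.getD k' 0 = 0 :=
    pv_zero_values ks PySem.Dict.empty (fun k' => by simp [PySem.Dict.getD_empty])
  obtain ⟨hAk, hAv⟩ := pv_outer ws dZ.items dZ
    (fun kv hkv => PySem.Dict.mem_keys_of_mem_items dZ hkv)
  set dA := dZ.items.foldl (fun d ij => ws.foldl
      (fun d w => if PySem.Str.isIn ij.1.2 w then d.modify ij.1 0 (· + 1) else d) d) dZ with hdA
  have hAval : ∀ k' ∈ dA.keys, dA.getD k' 0 = pvSumMatches ws k'.2 := by
    intro k' hk'
    rw [hAv k', hZ0 k']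
    rw [hAk] at hk'
    have h1 : (dZ.items.map Prod.fst).count k' = 1 := by
      have : dZ.items.map Prod.fst = dZ.keys := rfl
      rw [this]
      exact List.count_eq_one_of_mem hnodup hk'
    rw [h1]; ring
  have hCval : ∀ k' ∈ dC.keys, dC.getD k' 0 = pvSumMatches ws k'.2 :=
    pv_direct_values ws ks PySem.Dict.empty (by simp [PySem.Dict.keys_empty])
  -- both item lists are the same map over the same key list
  have : dA.items = dC.items := by
    rw [pv_items_char dA 0 (by rw [hAk]; exact hnodup), pv_items_char dC 0 hnodupC, hAk, hkZ, hkC]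
    apply List.map_congr_left
    intro k hk
    rw [hAval k (by rw [hAk, hkZ]; exact hk), hCval k (by rw [hkC]; exact hk)]
  rw [this]
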